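-- pv_equiv track=rewrite | github.com/D4Mortal/PUBG-the-board-game-AI | partA.py | eliminationList
-- ===== SOURCE A (Python) =====
-- from collections import defaultdict
--
-- BLACK = '@'
--
-- SIZE = 8
--
-- MODS = {'R':(0,1),
--        '2R':(0,2),
--        'L': (0,-1),
--        '2L': (0,-2),
--        'D':(1,0),
--        '2D':(2,0),
--        'U':(-1,0),
--        '2U':(-2,0)}
--
-- def move(board, row, col, dir):
--     '''
--     '''
--     return board[row + MODS[dir][0]][col + MODS[dir][1]]
--
-- def numOfSurrBlack(board, row, col):
--     '''
--     count black pieces surrounding current position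
--     '''
--     count = 0
--     checkCond = {'D':[row+1 < SIZE],
--                  'U':[row-1 >= 0],
--                  'R':[col+1 < SIZE],
--                  'L':[col-1 >= 0]}
--
--     for m in checkCond:
--         if checkCond[m][0]:
--             posCheck = move(board,row,col, m)
--             if posCheck == BLACK: count += 1
--
--     return count
--
-- def eliminationList(board):
--     '''
--     - generate list of black pieces to be eliminated
--     - list order determined by the number of surrounding black pieces
--         , in increasing order
--     '''
--     row = 0
--     order = defaultdict(int)
--
--     for line in board:
--         col = 0
--         for value in line:
--             if board[row][col] == BLACK:
--                 order[str(row) + str(col)] = numOfSurrBlack(board, row, col)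
--             col += 1
--         row += 1
--
--     return sorted(order, key = order.get)
-- ===== SOURCE B (Python) =====
-- BLACK = '@'
--
--
-- def eliminationList(board):
--     '''
--     - generate list of black pieces to be eliminated
--     - list order determined by the number of surrounding black pieces
--         , in increasing order
--     '''
--     blacks = [(r, c) for r, line in enumerate(board)
--                      for c, value in enumerate(line) if value == BLACK]
--     blackset = set(blacks)
--     order = {str(r) + str(c): 0 for r, c in blacks}
--     for r, c in blacks:
--         if (r, c + 1) in blackset:
--             order[str(r) + str(c)] += 1
--             order[str(r) + str(c + 1)] += 1
--         if (r + 1, c) in blackset: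
--             order[str(r) + str(c)] += 1
--             order[str(r + 1) + str(c)] += 1
--     return sorted(order, key=order.get)
-- ===== Notes on version B (the rewrite author's own statement) =====
-- stated objective: alternative
-- what changed: Instead of each black piece rescanning its four neighbours through the MODS/checkCond dictionaries, B collects the black positions once and accumulates counts over adjacencies: each black piece looks only right and down in a set of black positions, crediting both endpoints of every black-black edge; Pre_ restricts to boards that fit the game's 8x8 board (plus exactly the inputs where A returns instead of raising IndexError), because beyond index 7 A's hard-coded SIZE=8 window silently stops counting down/right neighbours, an artefact of its implementation.
import Mathlib
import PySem

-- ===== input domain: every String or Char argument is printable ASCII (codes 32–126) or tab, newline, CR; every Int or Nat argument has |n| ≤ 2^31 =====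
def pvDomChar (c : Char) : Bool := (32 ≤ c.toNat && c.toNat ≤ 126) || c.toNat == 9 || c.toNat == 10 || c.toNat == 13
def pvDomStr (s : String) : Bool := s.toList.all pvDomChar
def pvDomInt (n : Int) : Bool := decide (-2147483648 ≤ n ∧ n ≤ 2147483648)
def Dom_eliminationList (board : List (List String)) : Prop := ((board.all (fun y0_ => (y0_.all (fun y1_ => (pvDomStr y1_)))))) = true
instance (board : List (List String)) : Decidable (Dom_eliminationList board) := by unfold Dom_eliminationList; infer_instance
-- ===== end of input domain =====

-- B lists the same black pieces but accumulates the neighbour counts over black-black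
-- adjacencies (each black piece looks only right and down in a set of black positions,
-- crediting both endpoints) instead of rescanning all four neighbours of every cell;
-- objective: alternative.

-- ===== PORT A =====

def pvMods : PySem.Dict String (Int × Int) :=
  PySem.Dict.ofList [("R", ((0 : Int), (1 : Int))), ("2R", (0, 2)), ("L", (0, -1)), ("2L", (0, -2)),
                     ("D", (1, 0)), ("2D", (2, 0)), ("U", (-1, 0)), ("2U", (-2, 0))]

-- board[row + MODS[dir][0]][col + MODS[dir][1]]; an out-of-range read is an IndexError in
-- Python, modelled by the pyGetD defaults and excluded by Pre_eliminationList.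
def pvMove (board : List (List String)) (row col : Int) (dir : String) : String :=
  let m := pvMods.getD dir (0, 0)
  PySem.List.pyGetD (PySem.List.pyGetD board (row + m.1) []) (col + m.2) ""

def pvNumOfSurrBlack (board : List (List String)) (row col : Int) : Int :=
  let checkCond : PySem.Dict String (List Bool) :=
    PySem.Dict.ofList [("D", [decide (row + 1 < 8)]), ("U", [decide (row - 1 ≥ 0)]),
                       ("R", [decide (col + 1 < 8)]), ("L", [decide (col - 1 ≥ 0)])]
  -- 'for m in checkCond' iterates the keys in insertion order
  checkCond.keys.foldl
    (fun count m =>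
      if PySem.List.pyGetD (checkCond.getD m []) 0 false then
        if pvMove board row col m == "@" then count + 1 else count
      else count) 0

def eliminationList (board : List (List String)) : List String :=
  -- row = 0; order = defaultdict(int); the nested loops carry (row, order) resp. (col, order)
  let st := board.foldl
    (fun (st : Int × PySem.Dict String Int) (line : List String) =>
      let st2 := line.foldl
        (fun (st2 : Int × PySem.Dict String Int) (_value : String) =>
          let st2' :=
            if PySem.List.pyGetD (PySem.List.pyGetD board st.1 []) st2.1 "" == "@" then
              (st2.1, st2.2.insert (PySem.Int.toStr st.1 ++ PySem.Int.toStr st2.1)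
                        (pvNumOfSurrBlack board st.1 st2.1))
            else st2
          (st2'.1 + 1, st2'.2))
        ((0 : Int), st.2)
      (st.1 + 1, st2.2))
    ((0 : Int), PySem.Dict.empty)
  -- sorted(order, key=order.get): every key is present, so .get is its stored value
  PySem.List.sorted st.2.keys (fun k => st.2.getD k 0) false

-- ===== PORT B =====

def eliminationList_alt (board : List (List String)) : List String :=
  -- blacks = [(r, c) …], in row-major order
  let blacks := (PySem.List.enumerate board).flatMap (fun rl =>
    ((PySem.List.enumerate rl.2).filter (fun cv => cv.2 == "@")).map (fun cv => (rl.1, cv.1)))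
  let blackset := PySem.Set.ofList blacks
  -- order = {str(r) + str(c): 0 for r, c in blacks}
  let order0 := blacks.foldl
    (fun (d : PySem.Dict String Int) p =>
      d.insert (PySem.Int.toStr p.1 ++ PySem.Int.toStr p.2) 0) PySem.Dict.empty
  -- for r, c in blacks: credit both endpoints of the right and down adjacencies;
  -- order[k] += 1 on a key always present is Dict.modify
  let order := blacks.foldl
    (fun (d : PySem.Dict String Int) p =>
      let d1 :=
        if blackset.contains (p.1, p.2 + 1) then
          (d.modify (PySem.Int.toStr p.1 ++ PySem.Int.toStr p.2) 0 (· + 1)).modify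
            (PySem.Int.toStr p.1 ++ PySem.Int.toStr (p.2 + 1)) 0 (· + 1)
        else d
      if blackset.contains (p.1 + 1, p.2) then
        (d1.modify (PySem.Int.toStr p.1 ++ PySem.Int.toStr p.2) 0 (· + 1)).modify
          (PySem.Int.toStr (p.1 + 1) ++ PySem.Int.toStr p.2) 0 (· + 1)
      else d1)
    order0
  PySem.List.sorted order.keys (fun k => order.getD k 0) false

-- ===== PRECONDITION & SPEC =====

-- the black cells of the board, row-major (a plain comprehension over the input)
def pvBlacks (board : List (List String)) : List (Int × Int) :=
  (PySem.List.enumerate board).flatMap (fun rl =>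
    ((PySem.List.enumerate rl.2).filter (fun cv => cv.2 == "@")).map (fun cv => (rl.1, cv.1)))

-- The first conjunct is exactly where Python A returns instead of raising IndexError (every
-- neighbour probe of every black piece that the fixed SIZE=8 window allows must really exist).
-- The second conjunct restricts to the game's natural domain, boards that fit the 8×8 board:
-- beyond index 7 A's hard-coded SIZE=8 window silently stops counting down/right neighbours,
-- an artefact of its implementation, while B counts every adjacency.
def Pre_eliminationList (board : List (List String)) : Prop :=
  (∀ p ∈ pvBlacks board,
      (p.2 + 1 < 8 → p.2 + 1 < PySem.List.len (PySem.List.pyGetD board p.1 [])) ∧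
      (0 ≤ p.1 - 1 → p.2 < PySem.List.len (PySem.List.pyGetD board (p.1 - 1) [])) ∧
      (p.1 + 1 < 8 → p.1 + 1 < PySem.List.len board ∧
        p.2 < PySem.List.len (PySem.List.pyGetD board (p.1 + 1) []))) ∧
  PySem.List.len board ≤ 8 ∧ ∀ line ∈ board, PySem.List.len line ≤ 8

instance (board : List (List String)) : Decidable (Pre_eliminationList board) := by
  unfold Pre_eliminationList; infer_instance

def pvWitness_eliminationList : List (List String) :=
  [["@", "@", ".", ".", ".", ".", ".", "."],
   [".", ".", ".", ".", ".", ".", ".", "."],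
   [".", ".", "@", ".", ".", ".", ".", "."],
   [".", ".", ".", ".", ".", ".", ".", "."],
   [".", ".", ".", ".", ".", ".", ".", "."],
   [".", ".", ".", ".", ".", ".", ".", "."],
   [".", ".", ".", ".", ".", ".", ".", "."],
   [".", ".", ".", ".", ".", ".", "@", "@"]]

def Spec_eliminationList (board : List (List String)) (out : List String) : Prop :=
  out = eliminationList_alt board
instance (board : List (List String)) (out : List String) : Decidable (Spec_eliminationList board out) := by
  unfold Spec_eliminationList; infer_instance

-- ===== CLAIM (what is proved, stated in full; the proofs are below) =====
def Claim_equal_eliminationList : Prop := ∀ (board : List (List String)),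
  Dom_eliminationList board → Pre_eliminationList board →
    Spec_eliminationList board (eliminationList board)

-- ===== LEMMAS AND PROOFS =====

-- str(row) + str(col), the dictionary key of a cell
def pvKey (r c : Int) : String := PySem.Int.toStr r ++ PySem.Int.toStr c

-- board[r][c] through the pyGetD defaults (equals "@" only on a genuine in-range black cell)
def pvCell (board : List (List String)) (r c : Int) : String :=
  PySem.List.pyGetD (PySem.List.pyGetD board r []) c ""

-- the four guarded neighbour tests of numOfSurrBlack, in its D, U, R, L order
def pvCntA (board : List (List String)) (r c : Int) : Int :=
  (if r + 1 < 8 ∧ pvCell board (r + 1) c = "@" then 1 else 0) +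
  (if 0 ≤ r - 1 ∧ pvCell board (r - 1) c = "@" then 1 else 0) +
  (if c + 1 < 8 ∧ pvCell board r (c + 1) = "@" then 1 else 0) +
  (if 0 ≤ c - 1 ∧ pvCell board r (c - 1) = "@" then 1 else 0)

-- the keys B's second pass bumps when it processes black piece p
def pvBumpsOf (board : List (List String)) (p : Int × Int) : List String :=
  (if pvCell board p.1 (p.2 + 1) = "@" then [pvKey p.1 p.2, pvKey p.1 (p.2 + 1)] else []) ++
  (if pvCell board (p.1 + 1) p.2 = "@" then [pvKey p.1 p.2, pvKey (p.1 + 1) p.2] else [])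

def pvBumps (board : List (List String)) : List String :=
  (pvBlacks board).flatMap (pvBumpsOf board)

-- all cells as ((row, line), (col, value)) in traversal order
def pvCells (board : List (List String)) : List ((Int × List String) × (Int × String)) :=
  (PySem.List.enumerate board).flatMap (fun rl =>
    (PySem.List.enumerate rl.2).map (fun cv => (rl, cv)))

-- canonical single-fold forms of the three dictionary-building loops
def pvDA (board : List (List String)) : PySem.Dict String Int :=
  (pvBlacks board).foldl
    (fun d p => d.insert (pvKey p.1 p.2) (pvNumOfSurrBlack board p.1 p.2)) PySem.Dict.empty

def pvD0 (board : List (List String)) : PySem.Dict String Int :=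
  (pvBlacks board).foldl (fun d p => d.insert (pvKey p.1 p.2) 0) PySem.Dict.empty

def pvDB (board : List (List String)) : PySem.Dict String Int :=
  (pvBumps board).foldl (fun d k => d.modify k 0 (· + 1)) (pvD0 board)

theorem nestedFold_eq_cellsFold {β : Type} (board : List (List String))
    (f : β → (Int × List String) × (Int × String) → β) (d0 : β) :
    (PySem.List.enumerate board).foldl
      (fun d rl => (PySem.List.enumerate rl.2).foldl (fun d cv => f d (rl, cv)) d) d0
    = (pvCells board).foldl f d0 := by
  rw [pvCells, List.foldl_flatMap]
  exact PySem.List.foldl_congr_mem _ _ _ _ (fun acc rl _ => by rw [List.foldl_map])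

-- a guarded loop over all cells = a loop over the black cells

theorem cellsFold_eq_blacksFold {β : Type} (board : List (List String))
    (F : β → Int × Int → β) (d0 : β) :
    (pvCells board).foldl (fun d q => if q.2.2 == "@" then F d (q.1.1, q.2.1) else d) d0
    = (pvBlacks board).foldl F d0 := by
  have hb : pvBlacks board
      = ((pvCells board).filter (fun q => q.2.2 == "@")).map (fun q => (q.1.1, q.2.1)) := by
    simp [pvBlacks, pvCells, List.filter_flatMap, List.map_flatMap, List.filter_map,
      List.map_map, Function.comp_def]
  rw [hb, List.foldl_map, List.foldl_filter]

-- counter-carrying loop = loop over enumerate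

theorem foldl_counter {α β : Type} (h : Int → α → β → β) :
    ∀ (xs : List α) (i0 : Int) (d : β),
      xs.foldl (fun st x => (st.1 + 1, h st.1 x st.2)) (i0, d)
      = (i0 + xs.length, (PySem.List.enumerate xs i0).foldl (fun d q => h q.1 q.2 d) d) := by
  intro xs
  induction xs with
  | nil => intro i0 d; simp
  | cons x xs ih =>
    intro i0 d
    simp only [List.foldl_cons, PySem.List.enumerate_cons, ih, List.length_cons]
    exact Prod.ext (by push_cast; ring) rfl

theorem mem_cells (board : List (List String)) (q : (Int × List String) × (Int × String)) :
    q ∈ pvCells board ↔ ∃ (r : Nat) (hr : r < board.length) (c : Nat) (hc : c < board[r].length),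
      q = (((r : Int), board[r]), ((c : Int), board[r][c])) := by
  simp only [pvCells, List.mem_flatMap, List.mem_map, PySem.List.mem_enumerate_iff]
  constructor
  · rintro ⟨rl, ⟨r, hr, rfl⟩, cv, ⟨c, hc, rfl⟩, rfl⟩
    simp only at hc
    exact ⟨r, hr, c, by simpa using hc, by simp⟩
  · rintro ⟨r, hr, c, hc, rfl⟩
    exact ⟨((r : Int), board[r]), ⟨r, hr, by simp⟩, ((c : Int), board[r][c]), ⟨c, hc, by simp⟩, rfl⟩

theorem cells_line (board : List (List String)) (q : (Int × List String) × (Int × String))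
    (hq : q ∈ pvCells board) :
    q.1.2 = PySem.List.pyGetD board q.1.1 [] ∧ q.2.2 = pvCell board q.1.1 q.2.1
      ∧ 0 ≤ q.1.1 ∧ 0 ≤ q.2.1 := by
  rw [mem_cells] at hq
  obtain ⟨r, hr, c, hc, rfl⟩ := hq
  refine ⟨?_, ?_, by positivity, by positivity⟩
  · simp [PySem.List.pyGetD_natCast, List.getD_eq_getElem?_getD, List.getElem?_eq_getElem hr]
  · simp [pvCell, PySem.List.pyGetD_natCast, List.getD_eq_getElem?_getD,
      List.getElem?_eq_getElem hr, List.getElem?_eq_getElem hc]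

theorem mem_blacks (board : List (List String)) (p : Int × Int) :
    p ∈ pvBlacks board ↔ 0 ≤ p.1 ∧ 0 ≤ p.2 ∧ pvCell board p.1 p.2 = "@" := by
  obtain ⟨a, b⟩ := p
  simp only [pvBlacks, List.mem_flatMap, List.mem_map, List.mem_filter,
    PySem.List.mem_enumerate_iff]
  constructor
  · rintro ⟨rl, ⟨r, hr, rfl⟩, cv, ⟨⟨c, hc, rfl⟩, hb⟩, heq⟩
    simp only at hc hb heq
    injection heq with h1 h2
    subst h1; subst h2
    simp only [beq_iff_eq] at hb
    refine ⟨by positivity, by positivity, ?_⟩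
    rw [pvCell]
    simp only [zero_add, PySem.List.pyGetD_natCast, List.getD_eq_getElem?_getD,
      List.getElem?_eq_getElem hr, Option.getD_some, List.getElem?_eq_getElem hc]
    exact hb
  · rintro ⟨h1, h2, h3⟩
    obtain ⟨r, rfl⟩ := Int.eq_ofNat_of_zero_le h1
    obtain ⟨c, rfl⟩ := Int.eq_ofNat_of_zero_le h2
    simp only [pvCell, PySem.List.pyGetD_natCast, List.getD_eq_getElem?_getD] at h3
    have hr : r < board.length := by
      by_contra hge
      rw [List.getElem?_eq_none (le_of_not_gt hge)] at h3
      simp at h3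
    rw [List.getElem?_eq_getElem hr, Option.getD_some] at h3
    have hc : c < board[r].length := by
      by_contra hge
      rw [List.getElem?_eq_none (le_of_not_gt hge)] at h3
      simp at h3
    rw [List.getElem?_eq_getElem hc, Option.getD_some] at h3
    exact ⟨((r : Int), board[r]), ⟨r, hr, by simp⟩, ((c : Int), board[r][c]),
      ⟨⟨c, hc, by simp⟩, by simp [h3]⟩, rfl⟩

set_option maxHeartbeats 1000000 in
theorem numSurr_eq_cntA (board : List (List String)) (r c : Int) :
    pvNumOfSurrBlack board r c = pvCntA board r c := by
  simp only [pvNumOfSurrBlack]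
  have hk : (PySem.Dict.ofList [("D", [decide (r + 1 < 8)]), ("U", [decide (r - 1 ≥ 0)]),
      ("R", [decide (c + 1 < 8)]), ("L", [decide (c - 1 ≥ 0)])]).keys = ["D", "U", "R", "L"] := rfl
  have hD : (PySem.Dict.ofList [("D", [decide (r + 1 < 8)]), ("U", [decide (r - 1 ≥ 0)]),
      ("R", [decide (c + 1 < 8)]), ("L", [decide (c - 1 ≥ 0)])]).getD "D" [] = [decide (r + 1 < 8)] := rfl
  have hU : (PySem.Dict.ofList [("D", [decide (r + 1 < 8)]), ("U", [decide (r - 1 ≥ 0)]),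
      ("R", [decide (c + 1 < 8)]), ("L", [decide (c - 1 ≥ 0)])]).getD "U" [] = [decide (r - 1 ≥ 0)] := rfl
  have hR : (PySem.Dict.ofList [("D", [decide (r + 1 < 8)]), ("U", [decide (r - 1 ≥ 0)]),
      ("R", [decide (c + 1 < 8)]), ("L", [decide (c - 1 ≥ 0)])]).getD "R" [] = [decide (c + 1 < 8)] := rfl
  have hL : (PySem.Dict.ofList [("D", [decide (r + 1 < 8)]), ("U", [decide (r - 1 ≥ 0)]),
      ("R", [decide (c + 1 < 8)]), ("L", [decide (c - 1 ≥ 0)])]).getD "L" [] = [decide (c - 1 ≥ 0)] := rfl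
  have hMD : pvMove board r c "D" = pvCell board (r + 1) (c + 0) := rfl
  have hMU : pvMove board r c "U" = pvCell board (r + -1) (c + 0) := rfl
  have hMR : pvMove board r c "R" = pvCell board (r + 0) (c + 1) := rfl
  have hML : pvMove board r c "L" = pvCell board (r + 0) (c + -1) := rfl
  rw [hk]
  simp only [List.foldl_cons, List.foldl_nil, hD, hU, hR, hL, hMD, hMU, hMR, hML,
    PySem.List.pyGetD_zero_cons, decide_eq_true_eq, beq_iff_eq, add_zero]
  have e1 : r + -1 = r - 1 := by ring
  have e2 : c + -1 = c - 1 := by ring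
  rw [e1, e2]
  unfold pvCntA
  simp only [ite_and]
  split_ifs <;> omega

-- ----- the 8×8 window: single-digit keys are injective, black pieces have distinct keys -----

theorem key_toList (r c : Int) (h0r : 0 ≤ r) (h8r : r < 8) (h0c : 0 ≤ c) (h8c : c < 8) :
    (pvKey r c).toList = [r.toNat.digitChar, c.toNat.digitChar] := by
  unfold pvKey
  interval_cases r <;> interval_cases c <;> decide

theorem dchar_inj (a b : Nat) (ha : a < 8) (hb : b < 8)
    (h : Nat.digitChar a = Nat.digitChar b) : a = b := by
  interval_cases a <;> interval_cases b <;> first | rfl | (exact absurd h (by decide))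

theorem key_inj (r c r' c' : Int) (hr : 0 ≤ r ∧ r < 8) (hc : 0 ≤ c ∧ c < 8)
    (hr' : 0 ≤ r' ∧ r' < 8) (hc' : 0 ≤ c' ∧ c' < 8)
    (h : pvKey r c = pvKey r' c') : r = r' ∧ c = c' := by
  have hl := congrArg String.toList h
  rw [key_toList r c hr.1 hr.2 hc.1 hc.2, key_toList r' c' hr'.1 hr'.2 hc'.1 hc'.2] at hl
  simp only [List.cons.injEq, and_true] at hl
  have h1 := dchar_inj _ _ (by omega) (by omega) hl.1
  have h2 := dchar_inj _ _ (by omega) (by omega) hl.2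
  omega

theorem blacks_bounds (board : List (List String)) (p : Int × Int) (hp : p ∈ pvBlacks board) :
    ∃ (r : Nat) (hr : r < board.length) (c : Nat),
      c < board[r].length ∧ p = ((r : Int), (c : Int)) := by
  simp only [pvBlacks, List.mem_flatMap, List.mem_map, List.mem_filter,
    PySem.List.mem_enumerate_iff] at hp
  obtain ⟨rl, ⟨r, hr, rfl⟩, cv, ⟨⟨c, hc, rfl⟩, _⟩, heq⟩ := hp
  simp only at hc
  exact ⟨r, hr, c, by simpa using hc, by simp [← heq]⟩

-- on a board inside the 8×8 window every black piece has coordinates below 8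
theorem blacks_lt8 (board : List (List String)) (h1 : PySem.List.len board ≤ 8)
    (h2 : ∀ line ∈ board, PySem.List.len line ≤ 8)
    (p : Int × Int) (hp : p ∈ pvBlacks board) : p.1 < 8 ∧ p.2 < 8 := by
  obtain ⟨r, hr, c, hc, rfl⟩ := blacks_bounds board p hp
  have hlb := h2 board[r] (List.getElem_mem hr)
  rw [PySem.List.len_eq] at h1 hlb
  constructor <;> simp only <;> omega

theorem blacks_nodup (board : List (List String)) : (pvBlacks board).Nodup := by
  rw [pvBlacks, List.nodup_flatMap]
  constructor
  · intro rl _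
    have hpw : ((PySem.List.enumerate rl.2).filter (fun cv => cv.2 == "@")).Pairwise
        (fun p q => p.1 < q.1) :=
      (PySem.List.pairwise_lt_enumerate rl.2 0).sublist List.filter_sublist
    have hfst : (((PySem.List.enumerate rl.2).filter (fun cv => cv.2 == "@")).map
        Prod.fst).Nodup :=
      List.Pairwise.imp (fun h => by omega) (List.pairwise_map.mpr hpw)
    refine List.Nodup.map_on (fun x hx y hy hxy => ?_) ?_
    · have h1 : x.1 = y.1 := by simpa using congrArg Prod.snd hxy
      exact List.inj_on_of_nodup_map hfst hx hy h1
    · exact List.Pairwise.imp (fun h he => by subst he; omega) hpw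
  · refine List.Pairwise.imp ?_ (PySem.List.pairwise_lt_enumerate board 0)
    intro a b _ x hx hy
    simp only [List.mem_map] at hx hy
    obtain ⟨u, _, rfl⟩ := hx
    obtain ⟨v, _, hv⟩ := hy
    have := congrArg Prod.fst hv
    simp only at this
    omega

theorem keys_nodup (board : List (List String)) (h1 : PySem.List.len board ≤ 8)
    (h2 : ∀ line ∈ board, PySem.List.len line ≤ 8) :
    ((pvBlacks board).map (fun p => pvKey p.1 p.2)).Nodup := by
  refine List.Nodup.map_on (fun x hx y hy hxy => ?_) (blacks_nodup board)
  have hxb := (mem_blacks board x).mp hx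
  have hyb := (mem_blacks board y).mp hy
  have hx8 := blacks_lt8 board h1 h2 x hx
  have hy8 := blacks_lt8 board h1 h2 y hy
  have := key_inj x.1 x.2 y.1 y.2 ⟨hxb.1, hx8.1⟩ ⟨hxb.2.1, hx8.2⟩ ⟨hyb.1, hy8.1⟩ ⟨hyb.2.1, hy8.2⟩ hxy
  exact Prod.ext this.1 this.2

theorem set_update_self {α : Type} [BEq α] [LawfulBEq α] (l : List α) :
    ∀ (s : PySem.Set α), (∀ x ∈ l, x ∈ s) → PySem.Set.update s l = s := by
  induction l with
  | nil => intro s _; rfl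
  | cons x xs ih =>
    intro s hs
    have hx : PySem.Set.add s x = s := by
      have hmem : x ∈ s := hs x (by simp)
      simp [PySem.Set.add, PySem.Set.contains, hmem]
    show PySem.Set.update (PySem.Set.add s x) xs = s
    rw [hx]
    exact ih s (fun y hy => hs y (by simp [hy]))

theorem count_flatMap {α β : Type} [BEq β] (l : List α) (g : α → List β) (a : β) :
    (l.flatMap g).count a = (l.map (fun x => (g x).count a)).sum := by
  induction l with
  | nil => rfl
  | cons x xs ih => simp [List.flatMap_cons, List.count_append, ih]

theorem sum_ite_eq_mem {α : Type} [DecidableEq α] (l : List α) (t : α) (w : Int) (h : l.Nodup) :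
    (l.map (fun p => if p = t then w else 0)).sum = if t ∈ l then w else 0 := by
  induction l with
  | nil => simp
  | cons x xs ih =>
    simp only [List.nodup_cons] at h
    simp only [List.map_cons, List.sum_cons, ih h.2]
    by_cases hx : x = t
    · subst hx; simp [h.1]
    · simp [hx, Ne.symm hx]

theorem key_eq_iff (board : List (List String))
    (hnd : ((pvBlacks board).map (fun p => pvKey p.1 p.2)).Nodup)
    (q p : Int × Int) (hq : q ∈ pvBlacks board) (hp : p ∈ pvBlacks board) :
    pvKey q.1 q.2 = pvKey p.1 p.2 ↔ q = p :=
  ⟨fun h => List.inj_on_of_nodup_map hnd hq hp h, fun h => by rw [h]⟩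

theorem mem_bumps_key (board : List (List String)) (x : String) (hx : x ∈ pvBumps board) :
    ∃ q ∈ pvBlacks board, x = pvKey q.1 q.2 := by
  obtain ⟨p, hp, hxp⟩ := List.mem_flatMap.mp hx
  have hpB := (mem_blacks board p).mp hp
  rw [pvBumpsOf] at hxp
  rcases List.mem_append.mp hxp with h | h
  · split at h
    · rcases List.mem_cons.mp h with rfl | h
      · exact ⟨p, hp, rfl⟩
      · simp only [List.mem_singleton] at h
        subst h
        exact ⟨(p.1, p.2 + 1), (mem_blacks _ _).mpr ⟨hpB.1, by omega, by assumption⟩, rfl⟩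
    · simp at h
  · split at h
    · rcases List.mem_cons.mp h with rfl | h
      · exact ⟨p, hp, rfl⟩
      · simp only [List.mem_singleton] at h
        subst h
        exact ⟨(p.1 + 1, p.2), (mem_blacks _ _).mpr ⟨by omega, hpB.2.1, by assumption⟩, rfl⟩
    · simp at h

theorem count_bumpsOf (board : List (List String))
    (hnd : ((pvBlacks board).map (fun p => pvKey p.1 p.2)).Nodup)
    (p q : Int × Int) (hp : p ∈ pvBlacks board) (hq : q ∈ pvBlacks board) :
    ((pvBumpsOf board q).count (pvKey p.1 p.2) : Int) =
      (if q = (p.1, p.2 - 1) then 1 else 0)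
      + (if q = p then
          (if pvCell board p.1 (p.2 + 1) = "@" then 1 else 0)
          + (if pvCell board (p.1 + 1) p.2 = "@" then 1 else 0)
        else 0)
      + (if q = (p.1 - 1, p.2) then 1 else 0) := by
  have hpB := (mem_blacks board p).mp hp
  have hqB := (mem_blacks board q).mp hq
  have e2 : (pvKey q.1 q.2 = pvKey p.1 p.2) ↔ q = p := key_eq_iff board hnd q p hq hp
  rw [pvBumpsOf, List.count_append]
  by_cases hR : pvCell board q.1 (q.2 + 1) = "@" <;>
    by_cases hD : pvCell board (q.1 + 1) q.2 = "@" <;>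
    simp only [hR, hD, if_true, if_false, List.count_nil]
  · -- hR, hD
    have e1 : (pvKey q.1 (q.2 + 1) = pvKey p.1 p.2) ↔ q = (p.1, p.2 - 1) := by
      rw [key_eq_iff board hnd (q.1, q.2 + 1) p
        ((mem_blacks _ _).mpr ⟨hqB.1, by omega, hR⟩) hp]
      simp only [Prod.ext_iff]; constructor <;> (intro h; constructor <;> omega)
    have e3 : (pvKey (q.1 + 1) q.2 = pvKey p.1 p.2) ↔ q = (p.1 - 1, p.2) := by
      rw [key_eq_iff board hnd (q.1 + 1, q.2) p
        ((mem_blacks _ _).mpr ⟨by omega, hqB.2.1, hD⟩) hp]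
      simp only [Prod.ext_iff]; constructor <;> (intro h; constructor <;> omega)
    by_cases hqp : q = p
    · subst hqp
      have hL : ¬ (q = (q.1, q.2 - 1)) := by simp only [Prod.ext_iff]; intro h; omega
      have hU : ¬ (q = (q.1 - 1, q.2)) := by simp only [Prod.ext_iff]; intro h; omega
      simp [hL, hU, hR, hD, e1, e3]
    · simp [hqp, List.count_cons, beq_iff_eq, e1, e2, e3]
  · -- hR, ¬hD
    have e1 : (pvKey q.1 (q.2 + 1) = pvKey p.1 p.2) ↔ q = (p.1, p.2 - 1) := by
      rw [key_eq_iff board hnd (q.1, q.2 + 1) p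
        ((mem_blacks _ _).mpr ⟨hqB.1, by omega, hR⟩) hp]
      simp only [Prod.ext_iff]; constructor <;> (intro h; constructor <;> omega)
    have hU : ¬ (q = (p.1 - 1, p.2)) := by
      intro h; apply hD; rw [h]; simpa using hpB.2.2
    by_cases hqp : q = p
    · subst hqp
      have hL : ¬ (q = (q.1, q.2 - 1)) := by simp only [Prod.ext_iff]; intro h; omega
      simp [hL, hU, hR, hD, e1]
    · simp [hqp, hU, List.count_cons, beq_iff_eq, e1, e2]
  · -- ¬hR, hD
    have e3 : (pvKey (q.1 + 1) q.2 = pvKey p.1 p.2) ↔ q = (p.1 - 1, p.2) := by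
      rw [key_eq_iff board hnd (q.1 + 1, q.2) p
        ((mem_blacks _ _).mpr ⟨by omega, hqB.2.1, hD⟩) hp]
      simp only [Prod.ext_iff]; constructor <;> (intro h; constructor <;> omega)
    have hL : ¬ (q = (p.1, p.2 - 1)) := by
      intro h; apply hR; rw [h]; simpa using hpB.2.2
    by_cases hqp : q = p
    · subst hqp
      have hU : ¬ (q = (q.1 - 1, q.2)) := by simp only [Prod.ext_iff]; intro h; omega
      simp [hL, hU, hR, hD, e3]
    · simp [hqp, hL, List.count_cons, beq_iff_eq, e2, e3]
  · -- ¬hR, ¬hD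
    have hL : ¬ (q = (p.1, p.2 - 1)) := by
      intro h; apply hR; rw [h]; simpa using hpB.2.2
    have hU : ¬ (q = (p.1 - 1, p.2)) := by
      intro h; apply hD; rw [h]; simpa using hpB.2.2
    by_cases hqp : q = p
    · subst hqp
      simp [hL, hU, hR, hD]
    · simp [hL, hU, hqp]

theorem default_of_ge {α : Type} (l : List α) (i : Int) (d : α) (_h0 : 0 ≤ i)
    (h : PySem.List.len l ≤ i) : PySem.List.pyGetD l i d = d := by
  have : PySem.List.pyGet? l i = none := by
    rw [PySem.List.pyGet?_eq_none_iff]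
    intro hin
    rw [PySem.List.len_eq] at h
    rcases hin with ⟨_, h2⟩
    omega
  simp [PySem.List.pyGetD, this]

theorem lt_of_cell_ne {α : Type} (l : List α) (i : Int) (d : α) (h0 : 0 ≤ i)
    (h : PySem.List.pyGetD l i d ≠ d) : i < PySem.List.len l := by
  by_contra hge
  exact h (default_of_ge l i d h0 (le_of_not_gt hge))

-- a black read below index 8 one row/column out of an at-most-8×8 board is impossible
theorem window_row (board : List (List String)) (h1 : PySem.List.len board ≤ 8)
    (i c : Int) (h0 : 0 ≤ i) (h0c : 0 ≤ c) (h : pvCell board i c = "@") : i < 8 := by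
  have hne : PySem.List.pyGetD board i [] ≠ [] := by
    intro he
    rw [pvCell, he, default_of_ge [] c "" h0c (by simpa [PySem.List.len_eq] using h0c)] at h
    exact absurd h (by decide)
  exact lt_of_lt_of_le (lt_of_cell_ne board i [] h0 hne) h1

theorem window_col (board : List (List String))
    (h2 : ∀ line ∈ board, PySem.List.len line ≤ 8)
    (r c : Int) (h0r : 0 ≤ r) (h0c : 0 ≤ c) (h : pvCell board r c = "@") : c < 8 := by
  have hcell : PySem.List.pyGetD (PySem.List.pyGetD board r []) c "" ≠ "" := by
    rw [pvCell] at h; rw [h]; decide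
  have hne : PySem.List.pyGetD board r [] ≠ [] := by
    intro he
    rw [he] at hcell
    exact hcell (default_of_ge [] c "" h0c (by simpa [PySem.List.len_eq] using h0c))
  have hr : r < PySem.List.len board := lt_of_cell_ne board r [] h0r hne
  have hmem : PySem.List.pyGetD board r [] ∈ board := by
    rw [PySem.List.pyGetD_eq_getElem board [] h0r (by rwa [PySem.List.len_eq] at hr)]
    exact List.getElem_mem _
  exact lt_of_lt_of_le (lt_of_cell_ne _ c "" h0c hcell) (h2 _ hmem)

theorem count_bumps (board : List (List String))
    (h1 : PySem.List.len board ≤ 8) (h2 : ∀ line ∈ board, PySem.List.len line ≤ 8)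
    (p : Int × Int) (hp : p ∈ pvBlacks board) :
    ((pvBumps board).count (pvKey p.1 p.2) : Int) = pvCntA board p.1 p.2 := by
  have hnd := keys_nodup board h1 h2
  have hndB : (pvBlacks board).Nodup := blacks_nodup board
  have hpB := (mem_blacks board p).mp hp
  rw [pvBumps, count_flatMap]
  push_cast
  have hmc : ((pvBlacks board).map (fun x => ((pvBumpsOf board x).count (pvKey p.1 p.2) : Int)))
      = (pvBlacks board).map (fun q =>
          (if q = (p.1, p.2 - 1) then (1 : Int) else 0)
          + ((if q = p then
              (if pvCell board p.1 (p.2 + 1) = "@" then (1 : Int) else 0)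
              + (if pvCell board (p.1 + 1) p.2 = "@" then 1 else 0)
            else 0)
          + (if q = (p.1 - 1, p.2) then (1 : Int) else 0))) := by
    refine List.map_congr_left (fun q hq => ?_)
    rw [count_bumpsOf board hnd p q hp hq]; ring
  rw [List.map_map]
  simp only [Function.comp_def]
  rw [hmc, PySem.List.sum_map_add_int, PySem.List.sum_map_add_int,
    sum_ite_eq_mem _ _ _ hndB, sum_ite_eq_mem _ _ _ hndB, sum_ite_eq_mem _ _ _ hndB]
  simp only [hp, if_true, mem_blacks, pvCntA]
  have h1' : (0 ≤ p.1 ∧ 0 ≤ p.2 - 1 ∧ pvCell board p.1 (p.2 - 1) = "@")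
      ↔ (0 ≤ p.2 - 1 ∧ pvCell board p.1 (p.2 - 1) = "@") := by
    constructor
    · rintro ⟨_, h2', h3⟩; exact ⟨h2', h3⟩
    · rintro ⟨h2', h3⟩; exact ⟨hpB.1, h2', h3⟩
  have h3' : (0 ≤ p.1 - 1 ∧ 0 ≤ p.2 ∧ pvCell board (p.1 - 1) p.2 = "@")
      ↔ (0 ≤ p.1 - 1 ∧ pvCell board (p.1 - 1) p.2 = "@") := by
    constructor
    · rintro ⟨h2', _, h3⟩; exact ⟨h2', h3⟩
    · rintro ⟨h2', h3⟩; exact ⟨h2', hpB.2.1, h3⟩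
  have hdown : (p.1 + 1 < 8 ∧ pvCell board (p.1 + 1) p.2 = "@")
      ↔ pvCell board (p.1 + 1) p.2 = "@" :=
    ⟨And.right, fun h => ⟨window_row board h1 (p.1 + 1) p.2 (by omega) hpB.2.1 h, h⟩⟩
  have hright : (p.2 + 1 < 8 ∧ pvCell board p.1 (p.2 + 1) = "@")
      ↔ pvCell board p.1 (p.2 + 1) = "@" :=
    ⟨And.right, fun h => ⟨window_col board h2 p.1 (p.2 + 1) hpB.1 (by omega) h, h⟩⟩
  simp only [h1', h3', hdown, hright]
  ring

theorem itemsA (board : List (List String))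
    (hnd : ((pvBlacks board).map (fun p => pvKey p.1 p.2)).Nodup) :
    (pvDA board).items
      = (pvBlacks board).map (fun p => (pvKey p.1 p.2, pvNumOfSurrBlack board p.1 p.2)) := by
  rw [pvDA, PySem.Dict.items_foldl_insert_fresh (pvBlacks board) (fun p => pvKey p.1 p.2)
    (fun p => pvNumOfSurrBlack board p.1 p.2) PySem.Dict.empty
    (fun a _ => PySem.Dict.contains_empty _) hnd]
  simp [PySem.Dict.empty]

theorem items0 (board : List (List String))
    (hnd : ((pvBlacks board).map (fun p => pvKey p.1 p.2)).Nodup) :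
    (pvD0 board).items = (pvBlacks board).map (fun p => (pvKey p.1 p.2, (0 : Int))) := by
  rw [pvD0, PySem.Dict.items_foldl_insert_fresh (pvBlacks board) (fun p => pvKey p.1 p.2)
    (fun _ => (0 : Int)) PySem.Dict.empty (fun a _ => PySem.Dict.contains_empty _) hnd]
  simp [PySem.Dict.empty]

theorem keys0 (board : List (List String))
    (hnd : ((pvBlacks board).map (fun p => pvKey p.1 p.2)).Nodup) :
    (pvD0 board).keys = (pvBlacks board).map (fun p => pvKey p.1 p.2) := by
  simp only [PySem.Dict.keys, items0 board hnd, List.map_map, Function.comp_def]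

theorem keysB (board : List (List String))
    (hnd : ((pvBlacks board).map (fun p => pvKey p.1 p.2)).Nodup) :
    (pvDB board).keys = (pvD0 board).keys := by
  rw [pvDB, PySem.Dict.keys_foldl_modify (pvBumps board) 0 (fun _ _ => (· + 1)) (pvD0 board)]
  refine set_update_self _ _ (fun x hx => ?_)
  obtain ⟨q, hq, rfl⟩ := mem_bumps_key board x hx
  rw [keys0 board hnd]
  exact List.mem_map_of_mem hq

theorem getD_D0 (board : List (List String))
    (hnd : ((pvBlacks board).map (fun p => pvKey p.1 p.2)).Nodup)
    (p : Int × Int) (hp : p ∈ pvBlacks board) :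
    (pvD0 board).getD (pvKey p.1 p.2) 0 = 0 := by
  refine PySem.Dict.getD_of_mem_items _ ?_ ?_ 0
  · rw [items0 board hnd]
    exact List.mem_map_of_mem hp
  · rw [keys0 board hnd]; exact hnd

theorem dicts_eq (board : List (List String))
    (h1 : PySem.List.len board ≤ 8) (h2 : ∀ line ∈ board, PySem.List.len line ≤ 8) :
    pvDA board = pvDB board := by
  have hnd := keys_nodup board h1 h2
  apply PySem.Dict.ext
  have hkB : (pvDB board).keys = (pvBlacks board).map (fun p => pvKey p.1 p.2) :=
    (keysB board hnd).trans (keys0 board hnd)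
  have hitB : (pvDB board).items
      = (pvBlacks board).map (fun p => (pvKey p.1 p.2, pvCntA board p.1 p.2)) := by
    rw [PySem.Dict.items_eq_map_keys (pvDB board) (by rw [hkB]; exact hnd) 0, hkB,
      List.map_map]
    refine List.map_congr_left (fun p hp => ?_)
    simp only [Function.comp_def]
    rw [pvDB, PySem.Dict.getD_foldl_modify_add_one, getD_D0 board hnd p hp,
      count_bumps board h1 h2 p hp, zero_add]
  rw [itemsA board hnd, hitB]
  exact List.map_congr_left (fun p _ => by rw [numSurr_eq_cntA])

theorem A_flatten (board : List (List String)) :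
    (board.foldl
      (fun (st : Int × PySem.Dict String Int) (line : List String) =>
        let st2 := line.foldl
          (fun (st2 : Int × PySem.Dict String Int) (_value : String) =>
            let st2' :=
              if PySem.List.pyGetD (PySem.List.pyGetD board st.1 []) st2.1 "" == "@" then
                (st2.1, st2.2.insert (PySem.Int.toStr st.1 ++ PySem.Int.toStr st2.1)
                          (pvNumOfSurrBlack board st.1 st2.1))
              else st2
            (st2'.1 + 1, st2'.2))
          ((0 : Int), st.2)
        (st.1 + 1, st2.2))
      ((0 : Int), PySem.Dict.empty)).2
    = (pvCells board).foldl
        (fun d q => if q.2.2 == "@" then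
            d.insert (pvKey q.1.1 q.2.1) (pvNumOfSurrBlack board q.1.1 q.2.1) else d)
        PySem.Dict.empty := by
  have hstep : ∀ (row : Int),
      (fun (st2 : Int × PySem.Dict String Int) (_value : String) =>
        let st2' :=
          if PySem.List.pyGetD (PySem.List.pyGetD board row []) st2.1 "" == "@" then
            (st2.1, st2.2.insert (PySem.Int.toStr row ++ PySem.Int.toStr st2.1)
                      (pvNumOfSurrBlack board row st2.1))
          else st2
        (st2'.1 + 1, st2'.2))
      = (fun (st2 : Int × PySem.Dict String Int) (_value : String) =>
          (st2.1 + 1,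
            if PySem.List.pyGetD (PySem.List.pyGetD board row []) st2.1 "" == "@" then
              st2.2.insert (PySem.Int.toStr row ++ PySem.Int.toStr st2.1)
                (pvNumOfSurrBlack board row st2.1)
            else st2.2)) := by
    intro row; funext st2 v
    by_cases h : PySem.List.pyGetD (PySem.List.pyGetD board row []) st2.1 "" == "@" <;> simp [h]
  simp only [hstep]
  rw [foldl_counter (fun r line d =>
    (line.foldl
      (fun (st2 : Int × PySem.Dict String Int) (_value : String) =>
        (st2.1 + 1,
          if PySem.List.pyGetD (PySem.List.pyGetD board r []) st2.1 "" == "@" then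
            st2.2.insert (PySem.Int.toStr r ++ PySem.Int.toStr st2.1) (pvNumOfSurrBlack board r st2.1)
          else st2.2))
      ((0 : Int), d)).2) board 0 PySem.Dict.empty]
  have hin : ∀ (rl : Int × List String) (d : PySem.Dict String Int),
      ((rl.2.foldl
        (fun (st2 : Int × PySem.Dict String Int) (_value : String) =>
          (st2.1 + 1,
            if PySem.List.pyGetD (PySem.List.pyGetD board rl.1 []) st2.1 "" == "@" then
              st2.2.insert (PySem.Int.toStr rl.1 ++ PySem.Int.toStr st2.1) (pvNumOfSurrBlack board rl.1 st2.1)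
            else st2.2))
        ((0 : Int), d)).2)
      = (PySem.List.enumerate rl.2).foldl
          (fun d cv =>
            if PySem.List.pyGetD (PySem.List.pyGetD board rl.1 []) cv.1 "" == "@" then
              d.insert (PySem.Int.toStr rl.1 ++ PySem.Int.toStr cv.1) (pvNumOfSurrBlack board rl.1 cv.1)
            else d) d := by
    intro rl d
    rw [foldl_counter (fun c (_ : String) d =>
      if PySem.List.pyGetD (PySem.List.pyGetD board rl.1 []) c "" == "@" then
        d.insert (PySem.Int.toStr rl.1 ++ PySem.Int.toStr c) (pvNumOfSurrBlack board rl.1 c)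
      else d) rl.2 0 d]
  refine Eq.trans (PySem.List.foldl_congr_mem _ _ _ _ (fun d rl _ => hin rl d)) ?_
  refine Eq.trans (nestedFold_eq_cellsFold board (fun d q =>
    if PySem.List.pyGetD (PySem.List.pyGetD board q.1.1 []) q.2.1 "" == "@" then
      d.insert (PySem.Int.toStr q.1.1 ++ PySem.Int.toStr q.2.1) (pvNumOfSurrBlack board q.1.1 q.2.1)
    else d) PySem.Dict.empty) ?_
  refine PySem.List.foldl_congr_mem _ _ _ _ (fun d q hq => ?_)
  obtain ⟨h1, h2, _, _⟩ := cells_line board q hq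
  simp only [pvCell] at h2
  rw [← h2]
  simp only [pvKey]

-- A's port equals sorting pvDA
theorem elimA_eq (board : List (List String)) :
    eliminationList board
      = PySem.List.sorted (pvDA board).keys (fun k => (pvDA board).getD k 0) false := by
  have hA : (board.foldl
      (fun (st : Int × PySem.Dict String Int) (line : List String) =>
        let st2 := line.foldl
          (fun (st2 : Int × PySem.Dict String Int) (_value : String) =>
            let st2' :=
              if PySem.List.pyGetD (PySem.List.pyGetD board st.1 []) st2.1 "" == "@" then
                (st2.1, st2.2.insert (PySem.Int.toStr st.1 ++ PySem.Int.toStr st2.1)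
                          (pvNumOfSurrBlack board st.1 st2.1))
              else st2
            (st2'.1 + 1, st2'.2))
          ((0 : Int), st.2)
        (st.1 + 1, st2.2))
      ((0 : Int), PySem.Dict.empty)).2 = pvDA board :=
    (A_flatten board).trans (cellsFold_eq_blacksFold board
      (fun d p => d.insert (pvKey p.1 p.2) (pvNumOfSurrBlack board p.1 p.2)) PySem.Dict.empty)
  simp only [eliminationList]
  rw [hA]

-- 'k in blackset' tests exactly whether that cell exists and is black
theorem contains_blacks (board : List (List String)) (p : Int × Int)
    (h1 : 0 ≤ p.1) (h2 : 0 ≤ p.2) :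
    (PySem.Set.ofList (pvBlacks board)).contains p = decide (pvCell board p.1 p.2 = "@") := by
  rw [Bool.eq_iff_iff]
  simp only [decide_eq_true_eq]
  rw [show ((PySem.Set.ofList (pvBlacks board)).contains p = true) ↔ p ∈ pvBlacks board from by
      simp [PySem.Set.contains, PySem.Set.mem_ofList]]
  rw [mem_blacks]
  exact ⟨fun h => h.2.2, fun h => ⟨h1, h2, h⟩⟩

-- B's second pass accumulates exactly the bump list
theorem B2_flatten (board : List (List String)) (d0 : PySem.Dict String Int) :
    (pvBlacks board).foldl
      (fun (d : PySem.Dict String Int) p =>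
        let d1 :=
          if (PySem.Set.ofList (pvBlacks board)).contains (p.1, p.2 + 1) then
            (d.modify (PySem.Int.toStr p.1 ++ PySem.Int.toStr p.2) 0 (· + 1)).modify
              (PySem.Int.toStr p.1 ++ PySem.Int.toStr (p.2 + 1)) 0 (· + 1)
          else d
        if (PySem.Set.ofList (pvBlacks board)).contains (p.1 + 1, p.2) then
          (d1.modify (PySem.Int.toStr p.1 ++ PySem.Int.toStr p.2) 0 (· + 1)).modify
            (PySem.Int.toStr (p.1 + 1) ++ PySem.Int.toStr p.2) 0 (· + 1)
        else d1)
      d0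
    = (pvBumps board).foldl (fun d k => d.modify k 0 (· + 1)) d0 := by
  rw [pvBumps, List.foldl_flatMap]
  refine PySem.List.foldl_congr_mem _ _ _ _ (fun d p hp => ?_)
  have hpB := (mem_blacks board p).mp hp
  rw [contains_blacks board (p.1, p.2 + 1) hpB.1 (by omega),
    contains_blacks board (p.1 + 1, p.2) (by omega) hpB.2.1]
  simp only [pvBumpsOf, List.foldl_append, pvKey]
  by_cases hR : pvCell board p.1 (p.2 + 1) = "@" <;>
    by_cases hD : pvCell board (p.1 + 1) p.2 = "@" <;>
    simp [hR, hD]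

-- B's port equals sorting pvDB
theorem elimB_eq (board : List (List String)) :
    eliminationList_alt board
      = PySem.List.sorted (pvDB board).keys (fun k => (pvDB board).getD k 0) false := by
  simp only [eliminationList_alt]
  rw [show ((PySem.List.enumerate board).flatMap (fun rl =>
      ((PySem.List.enumerate rl.2).filter (fun cv => cv.2 == "@")).map (fun cv => (rl.1, cv.1))))
    = pvBlacks board from rfl]
  rw [show ((pvBlacks board).foldl
      (fun (d : PySem.Dict String Int) p =>
        d.insert (PySem.Int.toStr p.1 ++ PySem.Int.toStr p.2) 0) PySem.Dict.empty)
    = pvD0 board from by simp only [pvD0, pvKey]]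
  rw [B2_flatten board (pvD0 board)]
  rfl

-- ===== VERDICT (by name: the statement is the Claim_ definition above) =====
theorem eliminationList_spec : Claim_equal_eliminationList := by
  intro board _ hpre
  unfold Spec_eliminationList
  rw [elimA_eq, elimB_eq, dicts_eq board hpre.2.1 hpre.2.2]
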